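-- pv_equiv track=rewrite | github.com/GitMonsters/octotetrahedral-agi | arc-puzzle-catalog/re-arc/solves/5cdb0ce3/solver.py | transform
-- ===== SOURCE A (Python) =====
-- from collections import Counter, deque
--
-- def _components(grid, background):
--     h, w = len(grid), len(grid[0])
--     seen = [[False] * w for _ in range(h)]
--     for r in range(h):
--         for c in range(w):
--             if seen[r][c] or grid[r][c] == background:
--                 continue
--             color = grid[r][c]
--             queue = deque([(r, c)])
--             seen[r][c] = True
--             cells = []
--             while queue:
--                 x, y = queue.popleft()
--                 cells.append((x, y))
--                 for dx, dy in ((1, 0), (-1, 0), (0, 1), (0, -1)):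
--                     nx, ny = x + dx, y + dy
--                     if 0 <= nx < h and 0 <= ny < w and not seen[nx][ny] and grid[nx][ny] == color:
--                         seen[nx][ny] = True
--                         queue.append((nx, ny))
--             yield cells
--
-- def _component_type(cells):
--     cell_set = set(cells)
--     neighbors = {
--         cell: [
--             (cell[0] + dx, cell[1] + dy)
--             for dx, dy in ((1, 0), (-1, 0), (0, 1), (0, -1))
--             if (cell[0] + dx, cell[1] + dy) in cell_set
--         ]
--         for cell in cell_set
--     }
--     degrees = {cell: len(adj) for cell, adj in neighbors.items()}
--     endpoints = [cell for cell, degree in degrees.items() if degree == 1]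
--
--     if any(degree > 2 for degree in degrees.values()) or len(endpoints) != 2:
--         return 3
--
--     start = min(endpoints)
--     path = [start]
--     prev = None
--     cur = start
--     while True:
--         nxt = [cell for cell in neighbors[cur] if cell != prev]
--         if not nxt:
--             break
--         prev, cur = cur, nxt[0]
--         path.append(cur)
--
--     turns = 0
--     for i in range(len(path) - 2):
--         r1, c1 = path[i]
--         r2, c2 = path[i + 1]
--         r3, c3 = path[i + 2]
--         if (r2 - r1, c2 - c1) != (r3 - r2, c3 - c2):
--             turns += 1
--
--     return 6 if turns <= 1 else 9
--
-- def transform(grid):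
--     background = Counter(value for row in grid for value in row).most_common(1)[0][0]
--     result = [row[:] for row in grid]
--     for cells in _components(grid, background):
--         new_color = _component_type(cells)
--         for r, c in cells:
--             result[r][c] = new_color
--     return result
-- ===== SOURCE B (Python) =====
-- from collections import deque
--
--
-- def _flood_components(grid, background):
--     h, w = len(grid), len(grid[0])
--     seen = [[False] * w for _ in range(h)]
--     comps = []
--     for r in range(h):
--         for c in range(w):
--             if seen[r][c] or grid[r][c] == background:
--                 continue
--             color = grid[r][c]
--             queue = deque([(r, c)])
--             seen[r][c] = True
--             cells = []
--             while queue: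
--                 x, y = queue.popleft()
--                 cells.append((x, y))
--                 for dx, dy in ((1, 0), (-1, 0), (0, 1), (0, -1)):
--                     nx, ny = x + dx, y + dy
--                     if 0 <= nx < h and 0 <= ny < w and not seen[nx][ny] and grid[nx][ny] == color:
--                         seen[nx][ny] = True
--                         queue.append((nx, ny))
--             comps.append(cells)
--     return comps
--
--
-- def _shape_code(cells):
--     # 3 = branching/closed shape, 6 = straight or single-bend path, 9 = wiggly path.
--     # Counts corners locally (degree-2 cells whose neighbours are not collinear)
--     # instead of tracing and ordering the whole path.
--     cell_set = set(cells)
--     endpoints = 0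
--     corners = 0
--     for r, c in cell_set:
--         adj = [(r + dr, c + dc) for dr, dc in ((1, 0), (-1, 0), (0, 1), (0, -1))
--                if (r + dr, c + dc) in cell_set]
--         if len(adj) > 2:
--             return 3
--         if len(adj) == 1:
--             endpoints += 1
--         elif len(adj) == 2:
--             (r1, c1), (r2, c2) = adj
--             if (r1 - r, c1 - c) != (r - r2, c - c2):
--                 corners += 1
--     if endpoints != 2:
--         return 3
--     return 6 if corners <= 1 else 9
--
--
-- def transform(grid):
--     counts = {}
--     for row in grid:
--         for v in row:
--             counts[v] = counts.get(v, 0) + 1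
--     background = max(counts.items(), key=lambda kv: kv[1])[0]
--     colors = {}
--     for cells in _flood_components(grid, background):
--         code = _shape_code(cells)
--         for cell in cells:
--             colors[cell] = code
--     return [[colors.get((r, c), v) for c, v in enumerate(row)]
--             for r, row in enumerate(grid)]
-- ===== Notes on version B (the rewrite author's own statement) =====
-- stated objective: simpler
-- what changed: Component classification no longer orders the component: instead of walking the path from an endpoint, materialising it and counting direction changes over consecutive triples, B counts corners locally in one pass over the cells (a degree-2 cell whose two neighbours are not collinear is a corner); the background colour is taken with a single max() instead of Counter.most_common, and the output grid is rebuilt from a cell->colour mapping instead of mutating a copy in place.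
import Mathlib
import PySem

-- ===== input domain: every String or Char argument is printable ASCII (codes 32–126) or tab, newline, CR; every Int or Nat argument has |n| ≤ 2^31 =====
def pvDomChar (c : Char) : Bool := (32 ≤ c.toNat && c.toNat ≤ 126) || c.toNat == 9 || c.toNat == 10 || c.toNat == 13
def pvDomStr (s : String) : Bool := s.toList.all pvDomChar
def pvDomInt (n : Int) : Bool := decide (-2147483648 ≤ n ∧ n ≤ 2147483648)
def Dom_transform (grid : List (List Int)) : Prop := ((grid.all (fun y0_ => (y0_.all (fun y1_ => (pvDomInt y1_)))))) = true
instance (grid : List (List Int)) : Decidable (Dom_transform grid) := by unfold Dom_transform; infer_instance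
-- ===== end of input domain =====

-- B replaces A's path-tracing classifier by a one-pass local corner count (and rebuilds the
-- output from a cell→colour dict instead of mutating a copy); objective: simpler, same cost.

-- ===== PORT A =====

def pvDirs : List (Int × Int) := [(1, 0), (-1, 0), (0, 1), (0, -1)]

-- grid[x][y]; in both programs only evaluated at indices Python accepts, defaults unreachable
def pvGridAt (grid : List (List Int)) (x y : Int) : Int :=
  PySem.List.pyGetD (PySem.List.pyGetD grid x []) y 0

def pvSeenAt (seen : List (List Bool)) (x y : Int) : Bool :=
  PySem.List.pyGetD (PySem.List.pyGetD seen x []) y false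

def pvSeenSet (seen : List (List Bool)) (x y : Int) : List (List Bool) :=
  PySem.List.pySetD seen x (PySem.List.pySetD (PySem.List.pyGetD seen x []) y true)

-- the BFS 'while queue:' loop; fuel ≥ h*w+1 never runs out (each pop was one enqueue, and
-- a cell is enqueued at most once, when its 'seen' bit flips)
def pvBfs (grid : List (List Int)) (h w color : Int) :
    Nat → List (Int × Int) → List (List Bool) → List (Int × Int) →
    List (Int × Int) × List (List Bool)
  | 0, _, seen, cells => (cells, seen)
  | _ + 1, [], seen, cells => (cells, seen)
  | fuel + 1, (x, y) :: queue, seen, cells =>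
      let st := pvDirs.foldl (fun st d =>
        let nx := x + d.1
        let ny := y + d.2
        if 0 ≤ nx ∧ nx < h ∧ 0 ≤ ny ∧ ny < w ∧ pvSeenAt st.2 nx ny = false ∧
            pvGridAt grid nx ny = color then
          (st.1 ++ [(nx, ny)], pvSeenSet st.2 nx ny)
        else st) (queue, seen)
      pvBfs grid h w color fuel st.1 st.2 (cells ++ [(x, y)])

-- identical helper in Source A (_components) and Source B (_flood_components): defined once, used by both ports
def pvComponents (grid : List (List Int)) (background : Int) : List (List (Int × Int)) :=
  let h := PySem.List.len grid
  let w := PySem.List.len (PySem.List.pyGetD grid 0 [])   -- len(grid[0]); grid = [] excluded by Pre_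
  ((PySem.List.pyRange 0 h 1).foldl (fun st r =>
    (PySem.List.pyRange 0 w 1).foldl (fun st c =>
      if pvSeenAt st.2 r c || (pvGridAt grid r c == background) then st
      else
        let color := pvGridAt grid r c
        let res := pvBfs grid h w color (h.toNat * w.toNat + 1) [(r, c)] (pvSeenSet st.2 r c) []
        (st.1 ++ [res.1], res.2)) st)
    (([], (PySem.List.pyRange 0 h 1).map (fun _ => (PySem.List.pyRange 0 w 1).map (fun _ => false)))
      : List (List (Int × Int)) × List (List Bool))).1

-- identical comprehension in Source A (neighbors values) and Source B (adj): defined once, used by both ports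
def pvNbrList (cellSet : List (Int × Int)) (cell : Int × Int) : List (Int × Int) :=
  (pvDirs.filter (fun d => PySem.Set.contains cellSet (cell.1 + d.1, cell.2 + d.2))).map
    (fun d => (cell.1 + d.1, cell.2 + d.2))

-- neighbors = {cell: [...] for cell in cell_set}
def pvNbrsDict (cellSet : List (Int × Int)) : PySem.Dict (Int × Int) (List (Int × Int)) :=
  cellSet.foldl (fun d cell => d.insert cell (pvNbrList cellSet cell)) PySem.Dict.empty

-- degrees = {cell: len(adj) for cell, adj in neighbors.items()}
def pvDegreesDict (nbrs : PySem.Dict (Int × Int) (List (Int × Int))) : PySem.Dict (Int × Int) Int :=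
  nbrs.items.foldl (fun d p => d.insert p.1 (PySem.List.len p.2)) PySem.Dict.empty

def pvLexLt (a b : Int × Int) : Bool := a.1 < b.1 || (a.1 == b.1 && a.2 < b.2)

-- Python min() on a list of int pairs: lexicographic order, first minimum; [] raises (unreachable here)
def pvMin : List (Int × Int) → Int × Int
  | [] => (0, 0)
  | x :: xs => xs.foldl (fun m y => if pvLexLt y m then y else m) x

-- A's 'while True:' trace; fuel = len(cells)+1 never runs out: under the guard the walk is a
-- simple path, so it stops after at most |set(cells)| steps
def pvTrace (nbrs : PySem.Dict (Int × Int) (List (Int × Int))) :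
    Nat → Option (Int × Int) → Int × Int → List (Int × Int) → List (Int × Int)
  | 0, _, _, path => path
  | fuel + 1, prev, cur, path =>
    match (nbrs.getD cur []).filter (fun cell => !(some cell == prev)) with
    | [] => path
    | n :: _ => pvTrace nbrs fuel (some cur) n (path ++ [n])

def pvTypeA (cells : List (Int × Int)) : Int :=
  let cellSet := PySem.Set.ofList cells
  let nbrs := pvNbrsDict cellSet
  let degrees := pvDegreesDict nbrs
  let endpoints := (degrees.items.filter (fun p => p.2 == 1)).map (fun p => p.1)
  if (degrees.values.any (fun dg => decide (2 < dg))) || !(PySem.List.len endpoints == 2) then 3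
  else
    let start := pvMin endpoints
    let path := pvTrace nbrs (cells.length + 1) none start [start]
    let turns := (PySem.List.pyRange 0 (PySem.List.len path - 2) 1).foldl (fun t i =>
      let p1 := PySem.List.pyGetD path i (0, 0)
      let p2 := PySem.List.pyGetD path (i + 1) (0, 0)
      let p3 := PySem.List.pyGetD path (i + 2) (0, 0)
      if !((p2.1 - p1.1, p2.2 - p1.2) == (p3.1 - p2.1, p3.2 - p2.2)) then t + 1 else t) (0 : Int)
    if turns ≤ 1 then 6 else 9

def transform (grid : List (List Int)) : List (List Int) :=
  let flat := grid.flatMap (fun row => row)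
  let items := (PySem.Dict.counter flat).items
  -- Counter.most_common(1) = sorted(items, key=count, reverse=True)[:1] (heapq.nlargest's documented
  -- equivalence); then [0][0] — the [0] default is unreachable (flat ≠ [] under Pre_)
  let background := (PySem.List.pyGetD (PySem.List.sorted items (fun kv => kv.2) true) 0 (0, (0 : Int))).1
  let comps := pvComponents grid background
  comps.foldl (fun result cells =>
    let newColor := pvTypeA cells
    cells.foldl (fun result rc =>
      PySem.List.pySetD result rc.1
        (PySem.List.pySetD (PySem.List.pyGetD result rc.1 []) rc.2 newColor)) result)
    (grid.map (fun row => row))   -- result = [row[:] for row in grid]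

-- ===== PORT B =====

-- Source B's single pass over the component's cell set, with its early 'return 3'
def pvScan (cellSet : List (Int × Int)) : List (Int × Int) → Int → Int → Int
  | [], endpoints, corners => if !(endpoints == 2) then 3 else if corners ≤ 1 then 6 else 9
  | cell :: rest, endpoints, corners =>
    let adj := pvNbrList cellSet cell
    if 2 < adj.length then 3
    else if adj.length == 1 then pvScan cellSet rest (endpoints + 1) corners
    else if adj.length == 2 then
      let n1 := adj.headD (0, 0)          -- (r1, c1), (r2, c2) = adj  (length 2)
      let n2 := adj.tail.headD (0, 0)
      pvScan cellSet rest endpoints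
        (if !((n1.1 - cell.1, n1.2 - cell.2) == (cell.1 - n2.1, cell.2 - n2.2)) then corners + 1
         else corners)
    else pvScan cellSet rest endpoints corners

def pvTypeB (cells : List (Int × Int)) : Int :=
  let cellSet := PySem.Set.ofList cells
  pvScan cellSet cellSet 0 0

def transform_alt (grid : List (List Int)) : List (List Int) :=
  let counts := grid.foldl (fun d row =>
    row.foldl (fun d v => d.insert v (d.getD v 0 + 1)) d) (PySem.Dict.empty : PySem.Dict Int Int)
  -- max(counts.items(), key=snd)[0]; the default is unreachable (counts ≠ {} under Pre_)
  let background := ((PySem.List.max? counts.items (fun kv => kv.2)).getD ((0 : Int), (0 : Int))).1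
  let colors := (pvComponents grid background).foldl (fun d cells =>
    let code := pvTypeB cells
    cells.foldl (fun d cell => d.insert cell code) d)
    (PySem.Dict.empty : PySem.Dict (Int × Int) Int)
  (PySem.List.enumerate grid 0).map (fun rrow =>
    (PySem.List.enumerate rrow.2 0).map (fun cv => (colors.get? (rrow.1, cv.1)).getD cv.2))

-- ===== PRECONDITION & SPEC =====

-- Pre_ is exactly where the Python A returns: the grid is nonempty with at least one nonempty
-- row (else Counter(...).most_common(1)[0] / grid[0] raise IndexError), and unless the first
-- row is empty (then nothing is scanned) no row is shorter than it (else grid[r][c] raises)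
def Pre_transform (grid : List (List Int)) : Prop :=
  grid ≠ [] ∧ (∃ row ∈ grid, row ≠ []) ∧
    (grid.headD [] = [] ∨ ∀ row ∈ grid, (grid.headD []).length ≤ row.length)

instance (grid : List (List Int)) : Decidable (Pre_transform grid) := by
  unfold Pre_transform; infer_instance

def pvWitness_transform : List (List Int) := [[0, 1, 0], [0, 1, 0], [0, 0, 0]]

def Spec_transform (grid : List (List Int)) (out : List (List Int)) : Prop := out = transform_alt grid
instance (grid : List (List Int)) (out : List (List Int)) : Decidable (Spec_transform grid out) := by
  unfold Spec_transform; infer_instance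

-- ===== CLAIM (what is proved, stated in full; the proofs are below) =====
def Claim_equal_transform : Prop :=
  ∀ (grid : List (List Int)), Dom_transform grid → Pre_transform grid →
    Spec_transform grid (transform grid)

-- ===== LEMMAS AND PROOFS =====

-- ---------- proof-side vocabulary ----------

/-- grid adjacency of two cells (unit step in one of the four directions). -/
def pvAdjC (p q : Int × Int) : Prop := (q.1 - p.1, q.2 - p.2) ∈ pvDirs

/-- adjacency restricted to a cell list. -/
def pvRel (X : List (Int × Int)) (p q : Int × Int) : Prop := p ∈ X ∧ q ∈ X ∧ pvAdjC p q

def pvReach (X : List (Int × Int)) (p q : Int × Int) : Prop := Relation.ReflTransGen (pvRel X) p q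

/-- the facts the BFS guarantees for each component it yields. -/
def pvGood (cs : List (Int × Int)) : Prop :=
  (∀ p ∈ cs, 0 ≤ p.1 ∧ 0 ≤ p.2) ∧ ∀ a ∈ cs, ∀ b ∈ cs, pvReach cs a b

/-- the forced walk of A's trace, as the list of visited cells. -/
def pvVisits (S : List (Int × Int)) : Nat → Option (Int × Int) → Int × Int → List (Int × Int)
  | 0, _, cur => [cur]
  | fuel + 1, prev, cur =>
    cur ::
      (match (pvNbrList S cur).filter (fun cell => !(some cell == prev)) with
       | [] => []
       | n :: _ => pvVisits S fuel (some cur) n)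

/-- direction changes over consecutive triples. -/
def pvTurns : List (Int × Int) → Int
  | a :: b :: c :: rest =>
      (if !((b.1 - a.1, b.2 - a.2) == (c.1 - b.1, c.2 - b.2)) then 1 else 0) +
        pvTurns (b :: c :: rest)
  | _ => 0

/-- B's local corner test. -/
def pvCorner (S : List (Int × Int)) (c : Int × Int) : Bool :=
  match pvNbrList S c with
  | [n1, n2] => !((n1.1 - c.1, n1.2 - c.2) == (c.1 - n2.1, c.2 - n2.2))
  | _ => false

-- ---------- small facts ----------

theorem pvDirs_neg {d : Int × Int} (h : d ∈ pvDirs) : (-d.1, -d.2) ∈ pvDirs := by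
  fin_cases h <;> decide

theorem pvDirs_ne_zero {d : Int × Int} (h : d ∈ pvDirs) : d ≠ (0, 0) := by
  fin_cases h <;> decide

theorem mem_pvNbrList {S : List (Int × Int)} {c q : Int × Int} :
    q ∈ pvNbrList S c ↔ q ∈ S ∧ (q.1 - c.1, q.2 - c.2) ∈ pvDirs := by
  obtain ⟨q1, q2⟩ := q
  unfold pvNbrList
  simp only [List.mem_map, List.mem_filter]
  constructor
  · rintro ⟨d, ⟨hd, hmem⟩, h⟩
    rw [PySem.Set.contains_iff] at hmem
    obtain ⟨h1, h2⟩ := Prod.mk.injEq .. ▸ h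
    constructor
    · rw [← h1, ← h2]; exact hmem
    · have heq : (c.1 + d.1 - c.1, c.2 + d.2 - c.2) = d := by
        obtain ⟨d1, d2⟩ := d; simp only [Prod.mk.injEq]; omega
      rw [← h1, ← h2]; rw [heq]; exact hd
  · rintro ⟨hq, hd⟩
    refine ⟨(q1 - c.1, q2 - c.2), ⟨hd, ?_⟩, by simp⟩
    rw [PySem.Set.contains_iff]
    simpa using hq

theorem pvNbrList_nodup (S : List (Int × Int)) (c : Int × Int) : (pvNbrList S c).Nodup := by
  unfold pvNbrList
  apply List.Nodup.map
  · intro a b hab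
    obtain ⟨a1, a2⟩ := a; obtain ⟨b1, b2⟩ := b
    obtain ⟨h1, h2⟩ := Prod.mk.injEq .. ▸ hab
    simp only [Prod.mk.injEq]
    omega
  · exact List.Nodup.filter _ (by decide)

theorem pvNbrList_symm {S : List (Int × Int)} {c q : Int × Int} (hc : c ∈ S)
    (h : q ∈ pvNbrList S c) : c ∈ pvNbrList S q := by
  rw [mem_pvNbrList] at h
  rw [mem_pvNbrList]
  refine ⟨hc, ?_⟩
  have := pvDirs_neg h.2
  have heq : (-(q.1 - c.1), -(q.2 - c.2)) = (c.1 - q.1, c.2 - q.2) := by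
    simp only [Prod.mk.injEq]; omega
  rwa [heq] at this

theorem pvNbrList_ne_self {S : List (Int × Int)} {c q : Int × Int} (h : q ∈ pvNbrList S c) :
    q ≠ c := by
  rw [mem_pvNbrList] at h
  intro hqc
  exact pvDirs_ne_zero h.2 (by rw [hqc]; simp)

theorem pvNbrList_erase {S : List (Int × Int)} (hS : S.Nodup) (s c : Int × Int) :
    pvNbrList (S.erase s) c = (pvNbrList S c).filter (fun q => !(q == s)) := by
  unfold pvNbrList
  rw [List.filter_map, List.filter_filter]
  congr 1
  apply List.filter_congr
  intro d _
  rw [Bool.eq_iff_iff]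
  simp only [PySem.Set.contains_iff, Bool.and_eq_true, Function.comp]
  rw [hS.mem_erase_iff]
  simp only [Bool.not_eq_eq_eq_not, Bool.not_true, beq_eq_false_iff_ne, ne_eq]

theorem pvNbrList_erase_of_not_mem {S : List (Int × Int)} (hS : S.Nodup) {s c : Int × Int}
    (h : s ∉ pvNbrList S c) : pvNbrList (S.erase s) c = pvNbrList S c := by
  rw [pvNbrList_erase hS s c]
  apply List.filter_eq_self.mpr
  intro q hq
  simp only [Bool.not_eq_eq_eq_not, Bool.not_true, beq_eq_false_iff_ne, ne_eq]
  rintro rfl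
  exact h hq

/-- if c ∈ S is not adjacent to the endpoint s (whose only neighbour is t), erasing s
    does not change c's neighbour list. -/
theorem pvNbrList_not_mem_of_ne {S : List (Int × Int)} {s t c : Int × Int}
    (hs : pvNbrList S s = [t]) (hcS : c ∈ S) (hct : c ≠ t) : s ∉ pvNbrList S c := by
  intro hmem
  have hsS : s ∈ S := (mem_pvNbrList.mp hmem).1
  have := pvNbrList_symm hcS hmem
  rw [hs] at this
  simp at this
  exact hct this

-- ---------- walk helpers ----------

theorem pvVisits_cons (S : List (Int × Int)) (g : Nat) (p : Option (Int × Int)) (c : Int × Int) :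
    ∃ rest, pvVisits S g p c = c :: rest := by
  cases g with
  | zero => exact ⟨[], rfl⟩
  | succ g => exact ⟨_, rfl⟩

theorem pvReach_pair {S : List (Int × Int)} {s t : Int × Int}
    (hs : pvNbrList S s = [t]) (ht : pvNbrList S t = [s]) :
    ∀ b, pvReach S s b → b = s ∨ b = t := by
  intro b h
  induction h with
  | refl => exact Or.inl rfl
  | tail hab hbc ih =>
    rename_i b' c'
    obtain ⟨hbS, hcS, hadj⟩ := hbc
    have hcnb : c' ∈ pvNbrList S b' := mem_pvNbrList.mpr ⟨hcS, hadj⟩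
    rcases ih with rfl | rfl
    · rw [hs] at hcnb; simp at hcnb; exact Or.inr hcnb
    · rw [ht] at hcnb; simp at hcnb; exact Or.inl hcnb

theorem pvReach_erase {S : List (Int × Int)} (hS : S.Nodup) {s t : Int × Int}
    (hs : pvNbrList S s = [t]) {a b : Int × Int} (h : pvReach S a b) (has : a ≠ s) :
    pvReach (S.erase s) a (if b = s then t else b) := by
  induction h with
  | refl => rw [if_neg has]; exact Relation.ReflTransGen.refl
  | tail hab hbc ih =>
    rename_i b' c'
    obtain ⟨hbS, hcS, hadj⟩ := hbc
    have hcnb : c' ∈ pvNbrList S b' := mem_pvNbrList.mpr ⟨hcS, hadj⟩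
    have hts : t ≠ s := pvNbrList_ne_self (by rw [hs]; exact List.mem_singleton.mpr rfl)
    by_cases hcs : c' = s
    · subst hcs
      have hbt : b' = t := by
        have := pvNbrList_symm hbS hcnb
        rw [hs] at this; simpa using this
      rw [if_pos rfl]
      rw [hbt] at ih
      rw [if_neg hts] at ih
      exact ih
    · rw [if_neg hcs]
      by_cases hbs : b' = s
      · subst hbs
        have : c' = t := by rw [hs] at hcnb; simpa using hcnb
        subst this
        rw [if_pos rfl] at ih
        exact ih
      · rw [if_neg hbs] at ih
        refine ih.tail ⟨?_, ?_, hadj⟩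
        · exact (hS.mem_erase_iff).mpr ⟨hbs, hbS⟩
        · exact (hS.mem_erase_iff).mpr ⟨hcs, hcS⟩

theorem pvLockstep {S : List (Int × Int)} (hS : S.Nodup) {s t : Int × Int}
    (hs : pvNbrList S s = [t]) :
    ∀ (g : Nat) (pr c : Int × Int), c ∈ S.erase s →
      t ∉ pvVisits (S.erase s) g (some pr) c →
      pvVisits S g (some pr) c = pvVisits (S.erase s) g (some pr) c := by
  intro g
  induction g with
  | zero => intro pr c _ _; rfl
  | succ g ih =>
    intro pr c hc ht
    have hcS : c ∈ S := List.mem_of_mem_erase hc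
    have hcs : c ≠ s := fun hcs => by
      rw [hcs] at hc
      exact (List.Nodup.mem_erase_iff hS).mp hc |>.1 rfl
    have hct : c ≠ t := by
      intro hct
      exact ht (by rw [← hct]; exact List.mem_cons_self ..)
    have hnb : pvNbrList S c = pvNbrList (S.erase s) c :=
      (pvNbrList_erase_of_not_mem hS (pvNbrList_not_mem_of_ne hs hcS hct)).symm
    simp only [pvVisits, hnb]
    cases hcand : (pvNbrList (S.erase s) c).filter (fun cell => !(some cell == some pr)) with
    | nil => rfl
    | cons m ms =>
      simp only [pvVisits, hcand] at ht
      congr 1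
      have hmS' : m ∈ S.erase s := by
        have : m ∈ pvNbrList (S.erase s) c := List.mem_of_mem_filter (by rw [hcand]; simp)
        exact (mem_pvNbrList.mp this).1
      exact ih c m hmS' (fun hmem => ht (List.mem_cons_of_mem _ hmem))

-- ---------- the main path lemma ----------

theorem pvML (n : Nat) :
    ∀ (S : List (Int × Int)), S.Nodup → S.length ≤ n →
    (∀ c ∈ S, (pvNbrList S c).length ≤ 2) →
    S.countP (fun c => (pvNbrList S c).length == 1) = 2 →
    (∀ a ∈ S, ∀ b ∈ S, pvReach S a b) →
    ∀ s ∈ S, (pvNbrList S s).length = 1 →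
    ∀ fuel, S.length ≤ fuel →
    (pvVisits S fuel none s).Nodup ∧ (∀ c ∈ pvVisits S fuel none s, c ∈ S) ∧
      pvTurns (pvVisits S fuel none s) = (S.countP (pvCorner S) : Int) := by
  induction n with
  | zero =>
    intro S _ hlen _ _ _ s hsS _ _ _
    have := List.length_pos_of_mem hsS
    omega
  | succ n ih =>
    intro S hS hlen hdeg hend hconn s hsS hdegs fuel hfuel
    obtain ⟨t, hst⟩ := List.length_eq_one_iff.mp hdegs
    have htnb : t ∈ pvNbrList S s := by rw [hst]; exact List.mem_singleton.mpr rfl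
    have htS : t ∈ S := (mem_pvNbrList.mp htnb).1
    have hts : t ≠ s := pvNbrList_ne_self htnb
    have hsnbt : s ∈ pvNbrList S t := pvNbrList_symm hsS htnb
    have htS' : t ∈ S.erase s := (hS.mem_erase_iff).mpr ⟨hts, htS⟩
    have hlen2 : 2 ≤ S.length := by
      have h1 := List.length_erase_of_mem hsS
      have h2 := List.length_pos_of_mem htS'
      have h3 := List.length_pos_of_mem hsS
      omega
    obtain ⟨f1, rfl⟩ : ∃ f1, fuel = f1 + 1 := ⟨fuel - 1, by omega⟩
    have hdegt12 : (pvNbrList S t).length = 1 ∨ (pvNbrList S t).length = 2 := by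
      have h1 := hdeg t htS
      have h2 := List.length_pos_of_mem hsnbt
      omega
    -- first step of the walk: s → t
    have hv1 : pvVisits S (f1 + 1) none s = s :: pvVisits S f1 (some s) t := by
      simp only [pvVisits, hst]
      rfl
    rcases hdegt12 with hdegt | hdegt
    · -- degree of t is 1: S = {s, t}
      have hnbt : pvNbrList S t = [s] := by
        obtain ⟨a, ha⟩ := List.length_eq_one_iff.mp hdegt
        rw [ha] at hsnbt ⊢
        simp at hsnbt
        rw [hsnbt]
      have hmem2 : ∀ b ∈ S, b = s ∨ b = t := fun b hb => pvReach_pair hst hnbt b (hconn s hsS b hb)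
      have hperm : S.Perm [s, t] := by
        rw [List.perm_ext_iff_of_nodup hS (by simp [Ne.symm hts])]
        intro a
        constructor
        · intro ha; rcases hmem2 a ha with rfl | rfl <;> simp
        · intro ha
          rcases List.mem_pair.mp ha with rfl | rfl
          · exact hsS
          · exact htS
      have hlenS : S.length = 2 := by rw [hperm.length_eq]; rfl
      obtain ⟨f2, rfl⟩ : ∃ f2, f1 = f2 + 1 := ⟨f1 - 1, by omega⟩
      have hv2 : pvVisits S (f2 + 1) (some s) t = [t] := by
        simp only [pvVisits, hnbt]
        simp
      rw [hv1, hv2]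
      refine ⟨by simp [Ne.symm hts], ?_, ?_⟩
      · intro c hc
        rcases List.mem_pair.mp hc with rfl | rfl
        · exact hsS
        · exact htS
      · have hcount : S.countP (pvCorner S) = 0 := by
          rw [hperm.countP_eq]
          simp [pvCorner, hst, hnbt]
        rw [hcount]
        simp [pvTurns]
    · -- degree of t is 2: peel s off and recurse on S.erase s
      obtain ⟨a, b, hab⟩ := List.length_eq_two.mp hdegt
      have hnbtnd : (pvNbrList S t).Nodup := pvNbrList_nodup S t
      -- the other neighbour u of t
      obtain ⟨u, hus, huform⟩ : ∃ u, u ≠ s ∧ (pvNbrList S t = [s, u] ∨ pvNbrList S t = [u, s]) := by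
        rw [hab] at hsnbt hnbtnd
        rcases List.mem_pair.mp hsnbt with rfl | rfl
        · refine ⟨b, ?_, Or.inl hab⟩
          intro h; rw [h] at hnbtnd; simp at hnbtnd
        · refine ⟨a, ?_, Or.inr hab⟩
          intro h; rw [h] at hnbtnd; simp at hnbtnd
      have hunb : u ∈ pvNbrList S t := by rcases huform with h | h <;> rw [h] <;> simp
      have huS : u ∈ S := (mem_pvNbrList.mp hunb).1
      have hut : u ≠ t := pvNbrList_ne_self hunb
      have huS' : u ∈ S.erase s := (hS.mem_erase_iff).mpr ⟨hus, huS⟩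
      have hfilt : (pvNbrList S t).filter (fun q => !(q == s)) = [u] := by
        rcases huform with h | h <;> rw [h] <;> simp [hus]
      -- facts about S' = S.erase s
      have hS' : (S.erase s).Nodup := hS.erase s
      have hlen' : (S.erase s).length = S.length - 1 := List.length_erase_of_mem hsS
      have hnb't : pvNbrList (S.erase s) t = [u] := by
        rw [pvNbrList_erase hS s t, hfilt]
      have hnbeq : ∀ c ∈ S.erase s, c ≠ t → pvNbrList (S.erase s) c = pvNbrList S c := by
        intro c hc hct
        exact pvNbrList_erase_of_not_mem hS
          (pvNbrList_not_mem_of_ne hst (List.mem_of_mem_erase hc) hct)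
      have hdeg' : ∀ c ∈ S.erase s, (pvNbrList (S.erase s) c).length ≤ 2 := by
        intro c hc
        rw [pvNbrList_erase hS s c]
        exact le_trans (List.length_filter_le _ _) (hdeg c (List.mem_of_mem_erase hc))
      have hconn' : ∀ a ∈ S.erase s, ∀ b ∈ S.erase s, pvReach (S.erase s) a b := by
        intro a ha b hb
        have has : a ≠ s := ((hS.mem_erase_iff).mp ha).1
        have hbs : b ≠ s := ((hS.mem_erase_iff).mp hb).1
        have := pvReach_erase hS hst
          (hconn a (List.mem_of_mem_erase ha) b (List.mem_of_mem_erase hb)) has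
        rwa [if_neg hbs] at this
      -- endpoint count of S'
      have hpermS : S.Perm (s :: S.erase s) := List.perm_cons_erase hsS
      have hpermS' : (S.erase s).Perm (t :: (S.erase s).erase t) := List.perm_cons_erase htS'
      have hmemSS : ∀ c ∈ (S.erase s).erase t, c ≠ s ∧ c ≠ t ∧ c ∈ S := by
        intro c hc
        have h1 := (hS'.mem_erase_iff).mp hc
        have h2 := (hS.mem_erase_iff).mp h1.2
        exact ⟨h2.1, h1.1, h2.2⟩
      have hcount2 : ((S.erase s).erase t).countP (fun c => (pvNbrList S c).length == 1) = 1 := by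
        have h1 : S.countP (fun c => (pvNbrList S c).length == 1) =
            ((s :: t :: (S.erase s).erase t).countP (fun c => (pvNbrList S c).length == 1)) :=
          (hpermS.trans (hpermS'.cons s)).countP_eq _
        rw [hend] at h1
        simp only [List.countP_cons, hdegs, hdegt] at h1
        simp at h1
        omega
      have hend' : (S.erase s).countP (fun c => (pvNbrList (S.erase s) c).length == 1) = 2 := by
        rw [hpermS'.countP_eq]
        simp only [List.countP_cons, hnb't]
        have hcg : ((S.erase s).erase t).countP (fun c => (pvNbrList (S.erase s) c).length == 1)
            = ((S.erase s).erase t).countP (fun c => (pvNbrList S c).length == 1) := by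
          apply List.countP_congr
          intro c hc
          obtain ⟨hcs, hct, hcS⟩ := hmemSS c hc
          rw [hnbeq c ((hS'.mem_erase_iff).mp hc).2 hct]
        rw [hcg, hcount2]
        simp
      have hlen3 : 3 ≤ S.length := by
        have h2 := List.length_pos_of_mem ((hS'.mem_erase_iff).mpr ⟨hut, huS'⟩)
        have h3 := List.length_erase_of_mem htS'
        omega
      obtain ⟨f2, rfl⟩ : ∃ f2, f1 = f2 + 1 := ⟨f1 - 1, by omega⟩
      -- IH on S'
      obtain ⟨ihnd, ihmem, ihturns⟩ := ih (S.erase s) hS' (by omega) hdeg' hend' hconn' t htS'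
        (by rw [hnb't]; rfl) (f2 + 1) (by omega)
      -- unfold the walks
      have hv2 : pvVisits S (f2 + 1) (some s) t = t :: pvVisits S f2 (some t) u := by
        simp only [pvVisits]
        have : (pvNbrList S t).filter (fun cell => !(some cell == some s)) = [u] := by
          rw [show (fun cell => !(some cell == some s)) = (fun q : Int × Int => !(q == s)) by
            funext q; simp]
          exact hfilt
        rw [this]
      have hv2' : pvVisits (S.erase s) (f2 + 1) none t = t :: pvVisits (S.erase s) f2 (some t) u := by
        simp only [pvVisits, hnb't]
        simp
      rw [hv2'] at ihnd ihmem ihturns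
      have hts' : t ∉ pvVisits (S.erase s) f2 (some t) u := (List.nodup_cons.mp ihnd).1
      have hlock : pvVisits S f2 (some t) u = pvVisits (S.erase s) f2 (some t) u :=
        pvLockstep hS hst f2 t u huS' hts'
      obtain ⟨rest, hrest⟩ := pvVisits_cons (S.erase s) f2 (some t) u
      have hsnotin : s ∉ t :: pvVisits (S.erase s) f2 (some t) u := by
        intro hmem
        have := ihmem s hmem
        exact ((hS.mem_erase_iff).mp this).1 rfl
      rw [hv1, hv2, hlock]
      refine ⟨List.nodup_cons.mpr ⟨hsnotin, ihnd⟩, ?_, ?_⟩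
      · intro c hc
        rcases List.mem_cons.mp hc with rfl | hc
        · exact hsS
        · exact List.mem_of_mem_erase (ihmem c hc)
      · -- the turn count
        have hcornS : ∀ c ∈ (S.erase s).erase t, pvCorner S c = pvCorner (S.erase s) c := by
          intro c hc
          obtain ⟨hcs, hct, hcS⟩ := hmemSS c hc
          unfold pvCorner
          rw [hnbeq c ((hS'.mem_erase_iff).mp hc).2 hct]
        have hcs0 : pvCorner S s = false := by unfold pvCorner; rw [hst]
        have hct0 : pvCorner (S.erase s) t = false := by unfold pvCorner; rw [hnb't]
        have hSsplit : S.countP (pvCorner S) =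
            (if pvCorner S t then 1 else 0) + ((S.erase s).erase t).countP (pvCorner (S.erase s)) := by
          have h1 : S.countP (pvCorner S) =
              (s :: t :: (S.erase s).erase t).countP (pvCorner S) :=
            (hpermS.trans (hpermS'.cons s)).countP_eq _
          rw [h1]
          simp only [List.countP_cons, hcs0, Bool.false_eq_true, if_false]
          rw [List.countP_congr (fun c hc => by rw [hcornS c hc])]
          split <;> omega
        have hS'split : (S.erase s).countP (pvCorner (S.erase s)) =
            ((S.erase s).erase t).countP (pvCorner (S.erase s)) := by
          rw [hpermS'.countP_eq]
          simp [hct0]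
        rw [hrest]
        show pvTurns (s :: t :: u :: rest) = _
        have hturnstep : pvTurns (s :: t :: u :: rest) =
            (if !((t.1 - s.1, t.2 - s.2) == (u.1 - t.1, u.2 - t.2)) then 1 else 0) +
              pvTurns (t :: u :: rest) := by
          rw [pvTurns]
        have hcornert : pvCorner S t = !((t.1 - s.1, t.2 - s.2) == (u.1 - t.1, u.2 - t.2)) := by
          unfold pvCorner
          rcases huform with h | h <;> rw [h] <;>
            · rw [Bool.eq_iff_iff]
              simp only [Bool.not_eq_eq_eq_not, Bool.not_true, beq_eq_false_iff_ne, ne_eq,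
                Prod.mk.injEq, not_and]
              constructor <;> intro hx h1 <;> omega
        rw [hturnstep, ← hrest, ihturns, hSsplit, hS'split, hcornert]
        push_cast
        split <;> omega
  

-- ---------- bridges from the ports to the vocabulary ----------

-- ---------- computing the two classifiers ----------

theorem pvReach_congr {X Y : List (Int × Int)} (hxy : ∀ x, x ∈ X ↔ x ∈ Y) {a b : Int × Int}
    (h : pvReach X a b) : pvReach Y a b :=
  Relation.ReflTransGen.mono (fun p q hpq => ⟨(hxy p).mp hpq.1, (hxy q).mp hpq.2.1, hpq.2.2⟩) h

theorem pvMin_mem : ∀ (l : List (Int × Int)), l ≠ [] → pvMin l ∈ l := by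
  have aux : ∀ (xs : List (Int × Int)) (m : Int × Int),
      xs.foldl (fun m y => if pvLexLt y m then y else m) m ∈ m :: xs := by
    intro xs
    induction xs with
    | nil => intro m; simp
    | cons x xs ih =>
      intro m
      simp only [List.foldl_cons]
      by_cases hx : pvLexLt x m
      · rw [if_pos hx]
        rcases List.mem_cons.mp (ih x) with h | h
        · rw [h]; simp
        · exact List.mem_cons_of_mem _ (List.mem_cons_of_mem _ h)
      · rw [if_neg hx]
        rcases List.mem_cons.mp (ih m) with h | h
        · rw [h]; simp
        · exact List.mem_cons_of_mem _ (List.mem_cons_of_mem _ h)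
  intro l hl
  cases l with
  | nil => exact absurd rfl hl
  | cons x xs => exact aux xs x

theorem pvLenBeqOne (l : List (Int × Int)) : (PySem.List.len l == (1 : Int)) = (l.length == 1) := by
  rw [Bool.eq_iff_iff]
  simp [PySem.List.len_eq]

theorem pvNbrsDict_items {S : List (Int × Int)} (hS : S.Nodup) :
    (pvNbrsDict S).items = S.map (fun c => (c, pvNbrList S c)) := by
  unfold pvNbrsDict
  have := PySem.Dict.items_foldl_insert_fresh (l := S) (k := fun c => c)
    (v := fun c => pvNbrList S c) (d := PySem.Dict.empty)
    (fun a _ => PySem.Dict.contains_empty a) (by simpa using hS)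
  simpa using this

theorem pvNbrsDict_getD {S : List (Int × Int)} (hS : S.Nodup) {c : Int × Int} (hc : c ∈ S) :
    (pvNbrsDict S).getD c [] = pvNbrList S c := by
  apply PySem.Dict.getD_of_mem_items
  · rw [pvNbrsDict_items hS]
    exact List.mem_map_of_mem hc
  · unfold pvNbrsDict
    apply PySem.Dict.nodup_keys_foldl_insert
    simp [PySem.Dict.keys_empty]

theorem pvDegreesDict_items {S : List (Int × Int)} (hS : S.Nodup) :
    (pvDegreesDict (pvNbrsDict S)).items =
      S.map (fun c => (c, PySem.List.len (pvNbrList S c))) := by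
  unfold pvDegreesDict
  rw [pvNbrsDict_items hS, List.foldl_map]
  have := PySem.Dict.items_foldl_insert_fresh (l := S) (k := fun c => c)
    (v := fun c => PySem.List.len (pvNbrList S c)) (d := PySem.Dict.empty)
    (fun a _ => PySem.Dict.contains_empty a) (by simpa using hS)
  simpa using this

-- B's scan: early 3 on a branching cell
theorem pvScan_three (SS : List (Int × Int)) :
    ∀ (l : List (Int × Int)) (e k : Int), (∃ c ∈ l, 2 < (pvNbrList SS c).length) →
      pvScan SS l e k = 3 := by
  intro l
  induction l with
  | nil => intro e k h; simp at h
  | cons c rest ih =>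
    intro e k h
    simp only [pvScan]
    by_cases hc : 2 < (pvNbrList SS c).length
    · rw [if_pos hc]
    · rw [if_neg hc]
      have hrest : ∃ c' ∈ rest, 2 < (pvNbrList SS c').length := by
        rcases h with ⟨c', hc', hdeg⟩
        rcases List.mem_cons.mp hc' with rfl | hmem
        · exact absurd hdeg hc
        · exact ⟨c', hmem, hdeg⟩
      split <;> [skip; split] <;> [exact ih _ _ hrest; exact ih _ _ hrest; exact ih _ _ hrest]

-- B's scan on a branch-free cell list is an endpoint/corner count
theorem pvScan_eq (SS : List (Int × Int)) :
    ∀ (l : List (Int × Int)) (e k : Int), (∀ c ∈ l, (pvNbrList SS c).length ≤ 2) →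
      pvScan SS l e k =
        if !((e + (l.countP (fun c => (pvNbrList SS c).length == 1) : Int)) == 2) then 3
        else if k + (l.countP (pvCorner SS) : Int) ≤ 1 then 6 else 9 := by
  intro l
  induction l with
  | nil => intro e k _; simp [pvScan]
  | cons c rest ih =>
    intro e k hdeg
    have hc := hdeg c (List.mem_cons_self ..)
    have hrest : ∀ c' ∈ rest, (pvNbrList SS c').length ≤ 2 :=
      fun c' hc' => hdeg c' (List.mem_cons_of_mem _ hc')
    simp only [pvScan]
    rw [if_neg (by omega)]
    have hdc : (pvNbrList SS c).length = 0 ∨ (pvNbrList SS c).length = 1 ∨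
        (pvNbrList SS c).length = 2 := by omega
    rcases hdc with hdc | hdc | hdc
    · -- degree 0
      rw [if_neg (by simp [hdc]), if_neg (by simp [hdc]), ih _ _ hrest]
      have hcorn : pvCorner SS c = false := by
        unfold pvCorner
        rw [List.length_eq_zero_iff.mp hdc]
      simp [hdc, hcorn]
    · -- degree 1
      rw [if_pos (by simp [hdc]), ih _ _ hrest]
      have hcorn : pvCorner SS c = false := by
        unfold pvCorner
        obtain ⟨a, ha⟩ := List.length_eq_one_iff.mp hdc
        rw [ha]
      simp only [List.countP_cons, hdc, hcorn, Bool.false_eq_true, if_false, Nat.add_zero,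
        beq_self_eq_true, if_pos]
      have h1 : e + 1 + (rest.countP (fun c => (pvNbrList SS c).length == 1) : Int) =
          e + ((rest.countP (fun c => (pvNbrList SS c).length == 1) + 1 : Nat) : Int) := by
        push_cast; ring
      rw [h1]
    · -- degree 2
      rw [if_neg (by simp [hdc]), if_pos (by simp [hdc])]
      obtain ⟨n1, n2, hn⟩ := List.length_eq_two.mp hdc
      have hcorn : pvCorner SS c =
          !((((pvNbrList SS c).headD (0, 0)).1 - c.1, ((pvNbrList SS c).headD (0, 0)).2 - c.2) ==
            (c.1 - ((pvNbrList SS c).tail.headD (0, 0)).1,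
             c.2 - ((pvNbrList SS c).tail.headD (0, 0)).2)) := by
        unfold pvCorner
        rw [hn]
        rfl
      rw [← hcorn, ih _ _ hrest]
      have he2 : ((2 : Nat) == 1) = false := by decide
      simp only [List.countP_cons, hdc, he2, Bool.false_eq_true, if_false, Nat.add_zero]
      by_cases hcb : pvCorner SS c = true
      · rw [hcb]
        simp only [if_true]
        have h1 : k + ((rest.countP (pvCorner SS) + 1 : Nat) : Int) =
            k + 1 + (rest.countP (pvCorner SS) : Int) := by push_cast; ring
        rw [h1]
      · rw [Bool.not_eq_true] at hcb
        rw [hcb]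
        simp

-- ---------- bridging A's trace loop and turn loop ----------

theorem pvTrace_eq_visits (S : List (Int × Int)) (d : PySem.Dict (Int × Int) (List (Int × Int)))
    (hd : ∀ c ∈ S, d.getD c [] = pvNbrList S c) :
    ∀ (fuel : Nat) (prev : Option (Int × Int)) (cur : Int × Int) (acc : List (Int × Int)),
      cur ∈ S → pvTrace d fuel prev cur acc = acc ++ (pvVisits S fuel prev cur).tail := by
  intro fuel
  induction fuel with
  | zero => intro prev cur acc _; simp [pvTrace, pvVisits]
  | succ fuel ih =>
    intro prev cur acc hcur
    simp only [pvTrace, pvVisits, hd cur hcur]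
    cases hcand : (pvNbrList S cur).filter (fun cell => !(some cell == prev)) with
    | nil => simp
    | cons m ms =>
      have hmS : m ∈ S :=
        (mem_pvNbrList.mp (List.mem_of_mem_filter (by rw [hcand]; simp))).1
      show pvTrace d fuel (some cur) m (acc ++ [m]) =
        acc ++ (cur :: pvVisits S fuel (some cur) m).tail
      rw [ih (some cur) m (acc ++ [m]) hmS]
      obtain ⟨rest, hrest⟩ := pvVisits_cons S fuel (some cur) m
      rw [hrest]
      simp

theorem pvTurns_short (path : List (Int × Int)) (h : path.length ≤ 2) : pvTurns path = 0 := by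
  match path, h with
  | [], _ => rfl
  | [_], _ => rfl
  | [_, _], _ => rfl

theorem pvTurnsNat : ∀ (path : List (Int × Int)) (t0 : Int),
    (List.range (path.length - 2)).foldl
      (fun t j =>
        if !(((path.getD (j + 1) ((0 : Int), (0 : Int))).1 - (path.getD j ((0 : Int), (0 : Int))).1,
              (path.getD (j + 1) ((0 : Int), (0 : Int))).2 - (path.getD j ((0 : Int), (0 : Int))).2)
            ==
             ((path.getD (j + 2) ((0 : Int), (0 : Int))).1 -
                (path.getD (j + 1) ((0 : Int), (0 : Int))).1,
              (path.getD (j + 2) ((0 : Int), (0 : Int))).2 -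
                (path.getD (j + 1) ((0 : Int), (0 : Int))).2))
        then t + 1 else t) t0 = t0 + pvTurns path := by
  intro path
  induction path with
  | nil => intro t0; simp [pvTurns]
  | cons a path' ih =>
    intro t0
    match path', ih with
    | [], _ => simp [pvTurns]
    | [b], _ => simp [pvTurns]
    | b :: c :: rest, ih =>
      have hlen : (a :: b :: c :: rest).length - 2 = rest.length + 1 := by
        simp
      rw [hlen, List.range_succ_eq_map, List.foldl_cons, List.foldl_map]
      have hfun : (fun (t : Int) (j : Nat) =>
          if !((((a :: b :: c :: rest).getD (j.succ + 1) ((0 : Int), (0 : Int))).1 -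
                  ((a :: b :: c :: rest).getD j.succ ((0 : Int), (0 : Int))).1,
                ((a :: b :: c :: rest).getD (j.succ + 1) ((0 : Int), (0 : Int))).2 -
                  ((a :: b :: c :: rest).getD j.succ ((0 : Int), (0 : Int))).2) ==
               (((a :: b :: c :: rest).getD (j.succ + 2) ((0 : Int), (0 : Int))).1 -
                  ((a :: b :: c :: rest).getD (j.succ + 1) ((0 : Int), (0 : Int))).1,
                ((a :: b :: c :: rest).getD (j.succ + 2) ((0 : Int), (0 : Int))).2 -
                  ((a :: b :: c :: rest).getD (j.succ + 1) ((0 : Int), (0 : Int))).2))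
          then t + 1 else t) =
          (fun (t : Int) (j : Nat) =>
          if !((((b :: c :: rest).getD (j + 1) ((0 : Int), (0 : Int))).1 -
                  ((b :: c :: rest).getD j ((0 : Int), (0 : Int))).1,
                ((b :: c :: rest).getD (j + 1) ((0 : Int), (0 : Int))).2 -
                  ((b :: c :: rest).getD j ((0 : Int), (0 : Int))).2) ==
               (((b :: c :: rest).getD (j + 2) ((0 : Int), (0 : Int))).1 -
                  ((b :: c :: rest).getD (j + 1) ((0 : Int), (0 : Int))).1,
                ((b :: c :: rest).getD (j + 2) ((0 : Int), (0 : Int))).2 -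
                  ((b :: c :: rest).getD (j + 1) ((0 : Int), (0 : Int))).2))
          then t + 1 else t) := by
        funext t j
        have e1 : j.succ + 1 = (j + 1) + 1 := rfl
        have e2 : j.succ + 2 = (j + 2) + 1 := by omega
        have e3 : j.succ = j + 1 := rfl
        rw [e1, e2, e3]
        simp only [List.getD_cons_succ]
      rw [hfun]
      rw [show rest.length = (b :: c :: rest).length - 2 by simp]
      rw [ih]
      simp only [List.getD_cons_zero, List.getD_cons_succ]
      rw [pvTurns]
      split <;> ring

-- the Int-indexed turn-counting loop of port A, reduced to pvTurns
theorem pvTurnsFold_eq (path : List (Int × Int)) :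
    (PySem.List.pyRange 0 (PySem.List.len path - 2) 1).foldl (fun t i =>
      if !(((PySem.List.pyGetD path (i + 1) (0, 0)).1 - (PySem.List.pyGetD path i (0, 0)).1,
            (PySem.List.pyGetD path (i + 1) (0, 0)).2 - (PySem.List.pyGetD path i (0, 0)).2) ==
           ((PySem.List.pyGetD path (i + 2) (0, 0)).1 - (PySem.List.pyGetD path (i + 1) (0, 0)).1,
            (PySem.List.pyGetD path (i + 2) (0, 0)).2 - (PySem.List.pyGetD path (i + 1) (0, 0)).2))
      then t + 1 else t) (0 : Int)
    = pvTurns path := by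
  by_cases hlen : path.length ≤ 2
  · have hneg : PySem.List.len path - 2 ≤ 0 := by
      simp [PySem.List.len_eq]
      omega
    rw [PySem.List.pyRange_one_eq_nil hneg]
    rw [pvTurns_short path hlen]
    rfl
  · have hcast : PySem.List.len path - 2 = ((path.length - 2 : Nat) : Int) := by
      simp [PySem.List.len_eq]
      omega
    rw [hcast, PySem.List.pyRange_zero_nat, List.foldl_map]
    have hfun : (fun (t : Int) (j : Nat) =>
        if !(((PySem.List.pyGetD path ((j : Int) + 1) (0, 0)).1 -
                (PySem.List.pyGetD path (j : Int) (0, 0)).1,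
              (PySem.List.pyGetD path ((j : Int) + 1) (0, 0)).2 -
                (PySem.List.pyGetD path (j : Int) (0, 0)).2) ==
             ((PySem.List.pyGetD path ((j : Int) + 2) (0, 0)).1 -
                (PySem.List.pyGetD path ((j : Int) + 1) (0, 0)).1,
              (PySem.List.pyGetD path ((j : Int) + 2) (0, 0)).2 -
                (PySem.List.pyGetD path ((j : Int) + 1) (0, 0)).2))
        then t + 1 else t) =
        (fun (t : Int) (j : Nat) =>
        if !(((path.getD (j + 1) ((0 : Int), (0 : Int))).1 - (path.getD j ((0 : Int), (0 : Int))).1,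
              (path.getD (j + 1) ((0 : Int), (0 : Int))).2 - (path.getD j ((0 : Int), (0 : Int))).2)
            ==
             ((path.getD (j + 2) ((0 : Int), (0 : Int))).1 -
                (path.getD (j + 1) ((0 : Int), (0 : Int))).1,
              (path.getD (j + 2) ((0 : Int), (0 : Int))).2 -
                (path.getD (j + 1) ((0 : Int), (0 : Int))).2)) then t + 1 else t) := by
      funext t j
      have e1 : ((j : Int) + 1) = ((j + 1 : Nat) : Int) := by push_cast; ring
      have e2 : ((j : Int) + 2) = ((j + 2 : Nat) : Int) := by push_cast; ring
      simp only [e1, e2, PySem.List.pyGetD_natCast]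
    rw [hfun, pvTurnsNat]
    ring

theorem pvType_eq (cells : List (Int × Int)) (h : pvGood cells) :
    pvTypeA cells = pvTypeB cells := by
  have hS : (PySem.Set.ofList cells).Nodup := PySem.Set.nodup_ofList cells
  have hmemS : ∀ x, x ∈ PySem.Set.ofList cells ↔ x ∈ cells :=
    fun x => PySem.Set.mem_ofList cells x
  set S := PySem.Set.ofList cells with hSdef
  have hconn : ∀ a ∈ S, ∀ b ∈ S, pvReach S a b := by
    intro a ha b hb
    exact pvReach_congr (fun x => (hmemS x).symm)
      (h.2 a ((hmemS a).mp ha) b ((hmemS b).mp hb))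
  have hvals : (pvDegreesDict (pvNbrsDict S)).values
      = S.map (fun c => PySem.List.len (pvNbrList S c)) := by
    show ((pvDegreesDict (pvNbrsDict S)).items).map (fun p => p.2) = _
    rw [pvDegreesDict_items hS, List.map_map]
    rfl
  have hendp : ((pvDegreesDict (pvNbrsDict S)).items.filter (fun p => p.2 == 1)).map
        (fun p => p.1)
      = S.filter (fun c => (pvNbrList S c).length == 1) := by
    rw [pvDegreesDict_items hS, List.filter_map, List.map_map]
    have hcomp : S.filter ((fun (p : (Int × Int) × Int) => p.2 == 1) ∘
        (fun c => (c, PySem.List.len (pvNbrList S c)))) =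
        S.filter (fun c => (pvNbrList S c).length == 1) := by
      apply List.filter_congr
      intro c _
      simp only [Function.comp]
      exact pvLenBeqOne _
    rw [hcomp]
    have hproj : ((fun (p : (Int × Int) × Int) => p.1) ∘
        (fun c => (c, PySem.List.len (pvNbrList S c)))) = fun c => c := by
      funext c; rfl
    rw [hproj]
    simp
  have hany : ((pvDegreesDict (pvNbrsDict S)).values.any (fun dg => decide (2 < dg)) = true)
      ↔ (∃ c ∈ S, 2 < (pvNbrList S c).length) := by
    rw [hvals, List.any_map, List.any_eq_true]
    constructor
    · rintro ⟨c, hc, hdec⟩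
      refine ⟨c, hc, ?_⟩
      simp only [Function.comp, PySem.List.len_eq, decide_eq_true_eq] at hdec
      exact_mod_cast hdec
    · rintro ⟨c, hc, hlt⟩
      refine ⟨c, hc, ?_⟩
      simp only [Function.comp, PySem.List.len_eq, decide_eq_true_eq]
      exact_mod_cast hlt
  have hlenend : (PySem.List.len (S.filter (fun c => (pvNbrList S c).length == 1)) == (2 : Int))
      = (S.countP (fun c => (pvNbrList S c).length == 1) == 2) := by
    rw [Bool.eq_iff_iff]
    simp only [PySem.List.len_eq, ← List.countP_eq_length_filter, beq_iff_eq]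
    exact ⟨fun h' => by exact_mod_cast h', fun h' => by exact_mod_cast h'⟩
  by_cases hp1 : ∃ c ∈ S, 2 < (pvNbrList S c).length
  · -- a branching cell: both return 3
    have hA : pvTypeA cells = 3 := by
      simp only [pvTypeA]
      rw [if_pos]
      rw [Bool.or_eq_true]
      exact Or.inl (hany.mpr hp1)
    have hB : pvTypeB cells = 3 := by
      simp only [pvTypeB]
      exact pvScan_three S S 0 0 hp1
    rw [hA, hB]
  · have hdegall : ∀ c ∈ S, (pvNbrList S c).length ≤ 2 := by
      intro c hc
      by_contra hgt
      exact hp1 ⟨c, hc, by omega⟩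
    by_cases hp2 : S.countP (fun c => (pvNbrList S c).length == 1) = 2
    · -- a simple path: compare turn count with corner count
      have hfilterne : S.filter (fun c => (pvNbrList S c).length == 1) ≠ [] := by
        intro hnil
        rw [List.countP_eq_length_filter, hnil] at hp2
        simp at hp2
      have hstartmem := pvMin_mem _ hfilterne
      have hstartS : pvMin (S.filter (fun c => (pvNbrList S c).length == 1)) ∈ S :=
        List.mem_of_mem_filter hstartmem
      have hstartdeg :
          (pvNbrList S (pvMin (S.filter (fun c => (pvNbrList S c).length == 1)))).length = 1 := by
        have := (List.mem_filter.mp hstartmem).2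
        simpa using this
      obtain ⟨_, _, hturns⟩ := pvML S.length S hS le_rfl hdegall hp2 hconn _ hstartS hstartdeg
        (cells.length + 1)
        (by have := PySem.Set.length_ofList_le cells; rw [← hSdef] at this; omega)
      have hA : pvTypeA cells =
          (if pvTurns (pvVisits S (cells.length + 1) none
              (pvMin (S.filter (fun c => (pvNbrList S c).length == 1)))) ≤ 1 then 6 else 9) := by
        simp only [pvTypeA]
        rw [hendp, hlenend]
        have hgf : ¬ (((pvDegreesDict (pvNbrsDict S)).values.any (fun dg => decide (2 < dg))
            || !(S.countP (fun c => (pvNbrList S c).length == 1) == 2)) = true) := by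
          rw [Bool.or_eq_true]
          rintro (hx | hx)
          · exact hp1 (hany.mp hx)
          · rw [Bool.not_eq_eq_eq_not, Bool.not_true, beq_eq_false_iff_ne] at hx
            exact hx hp2
        rw [if_neg hgf]
        rw [pvTrace_eq_visits S (pvNbrsDict S) (fun c hc => pvNbrsDict_getD hS hc)
          (cells.length + 1) none _ _ hstartS]
        have hv : [pvMin (S.filter (fun c => (pvNbrList S c).length == 1))] ++
            (pvVisits S (cells.length + 1) none
              (pvMin (S.filter (fun c => (pvNbrList S c).length == 1)))).tail =
            pvVisits S (cells.length + 1) none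
              (pvMin (S.filter (fun c => (pvNbrList S c).length == 1))) := by
          obtain ⟨rest, hrest⟩ := pvVisits_cons S (cells.length + 1) none
            (pvMin (S.filter (fun c => (pvNbrList S c).length == 1)))
          rw [hrest]
          rfl
        simp only [hv, pvTurnsFold_eq]
      have hB : pvTypeB cells =
          (if (S.countP (pvCorner S) : Int) ≤ 1 then 6 else 9) := by
        simp only [pvTypeB]
        rw [pvScan_eq S S 0 0 hdegall]
        rw [if_neg (by simp [hp2])]
        simp
      rw [hA, hB, hturns]
    · -- endpoint count wrong: both return 3
      have hA : pvTypeA cells = 3 := by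
        simp only [pvTypeA]
        rw [hendp, hlenend]
        rw [if_pos]
        rw [Bool.or_eq_true]
        right
        simp [hp2]
      have hB : pvTypeB cells = 3 := by
        simp only [pvTypeB]
        rw [pvScan_eq S S 0 0 hdegall]
        rw [if_pos ?_]
        simp only [zero_add, Bool.not_eq_eq_eq_not, Bool.not_true, beq_eq_false_iff_ne, ne_eq]
        intro hx
        exact hp2 (by exact_mod_cast hx)
      rw [hA, hB]

-- ---------- BFS invariants ----------

theorem pvAdjC_symm {p q : Int × Int} (h : pvAdjC p q) : pvAdjC q p := by
  have := pvDirs_neg h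
  have heq : (-(q.1 - p.1), -(q.2 - p.2)) = (p.1 - q.1, p.2 - q.2) := by
    simp only [Prod.mk.injEq]; omega
  rwa [heq] at this

theorem pvReach_mono {X Y : List (Int × Int)} (hsub : ∀ x ∈ X, x ∈ Y) {a b : Int × Int}
    (h : pvReach X a b) : pvReach Y a b :=
  Relation.ReflTransGen.mono (fun p q hpq => ⟨hsub p hpq.1, hsub q hpq.2.1, hpq.2.2⟩) h

theorem pvReach_symm {X : List (Int × Int)} {a b : Int × Int} (h : pvReach X a b) :
    pvReach X b a :=
  Relation.ReflTransGen.symmetric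
    (fun _ _ hpq => ⟨hpq.2.1, hpq.1, pvAdjC_symm hpq.2.2⟩) h

/-- the push loop of one BFS step only adds in-bounds neighbours of the popped cell. -/
theorem pvBfs_push_aux (grid : List (List Int)) (h w color x y : Int)
    (P : Int × Int → Prop)
    (hnew : ∀ d ∈ pvDirs, 0 ≤ x + d.1 → 0 ≤ y + d.2 → P (x + d.1, y + d.2)) :
    ∀ (ds : List (Int × Int)) (st : List (Int × Int) × List (List Bool)),
      (∀ d ∈ ds, d ∈ pvDirs) → (∀ p ∈ st.1, P p) →
      ∀ p ∈ (ds.foldl (fun st d =>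
        if 0 ≤ x + d.1 ∧ x + d.1 < h ∧ 0 ≤ y + d.2 ∧ y + d.2 < w ∧
            pvSeenAt st.2 (x + d.1) (y + d.2) = false ∧ pvGridAt grid (x + d.1) (y + d.2) = color
        then (st.1 ++ [(x + d.1, y + d.2)], pvSeenSet st.2 (x + d.1) (y + d.2)) else st) st).1,
        P p := by
  intro ds
  induction ds with
  | nil => intro st _ hst p hp; exact hst p hp
  | cons d ds ih =>
    intro st hds hst
    simp only [List.foldl_cons]
    apply ih _ (fun d' hd' => hds d' (List.mem_cons_of_mem _ hd'))
    intro p hp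
    split at hp
    · rename_i hguard
      rcases List.mem_append.mp hp with hp | hp
      · exact hst p hp
      · rw [List.mem_singleton.mp hp]
        exact hnew d (hds d (List.mem_cons_self ..)) (by omega) (by omega)
    · exact hst p hp

theorem pvBfs_invariant (grid : List (List Int)) (h w color : Int) (start : Int × Int) :
    ∀ (fuel : Nat) (queue : List (Int × Int)) (seen : List (List Bool))
      (cells : List (Int × Int)),
      (∀ p ∈ cells, (0 ≤ p.1 ∧ 0 ≤ p.2) ∧ pvReach cells start p) →
      (∀ p ∈ queue, (0 ≤ p.1 ∧ 0 ≤ p.2) ∧ (p = start ∨ ∃ q ∈ cells, pvAdjC q p)) →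
      ∀ p ∈ (pvBfs grid h w color fuel queue seen cells).1,
        (0 ≤ p.1 ∧ 0 ≤ p.2) ∧
          pvReach (pvBfs grid h w color fuel queue seen cells).1 start p := by
  intro fuel
  induction fuel with
  | zero => intro queue seen cells h1 _ p hp; exact h1 p hp
  | succ fuel ih =>
    intro queue seen cells h1 h2
    match queue with
    | [] => exact h1
    | (x, y) :: queue =>
      simp only [pvBfs]
      have hxy := h2 (x, y) (List.mem_cons_self ..)
      have h1' : ∀ p ∈ cells ++ [(x, y)], (0 ≤ p.1 ∧ 0 ≤ p.2) ∧
          pvReach (cells ++ [(x, y)]) start p := by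
        intro p hp
        rcases List.mem_append.mp hp with hp | hp
        · exact ⟨(h1 p hp).1, pvReach_mono (fun q hq => List.mem_append_left _ hq) (h1 p hp).2⟩
        · rw [List.mem_singleton.mp hp]
          refine ⟨hxy.1, ?_⟩
          rcases hxy.2 with heq | ⟨q, hq, hadj⟩
          · rw [heq]; exact Relation.ReflTransGen.refl
          · have hq' : pvReach (cells ++ [(x, y)]) start q :=
              pvReach_mono (fun r hr => List.mem_append_left _ hr) (h1 q hq).2
            exact hq'.tail ⟨List.mem_append_left _ hq,
              List.mem_append_right _ (List.mem_singleton.mpr rfl), hadj⟩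
      have h2' : ∀ p ∈ (pvDirs.foldl (fun st d =>
          if 0 ≤ x + d.1 ∧ x + d.1 < h ∧ 0 ≤ y + d.2 ∧ y + d.2 < w ∧
              pvSeenAt st.2 (x + d.1) (y + d.2) = false ∧
              pvGridAt grid (x + d.1) (y + d.2) = color
          then (st.1 ++ [(x + d.1, y + d.2)], pvSeenSet st.2 (x + d.1) (y + d.2)) else st)
          (queue, seen)).1,
          (0 ≤ p.1 ∧ 0 ≤ p.2) ∧ (p = start ∨ ∃ q ∈ cells ++ [(x, y)], pvAdjC q p) := by
        refine pvBfs_push_aux grid h w color x y _ ?_ pvDirs (queue, seen) (fun d hd => hd) ?_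
        · intro d hd hdx hdy
          refine ⟨⟨hdx, hdy⟩, Or.inr ⟨(x, y),
            List.mem_append_right _ (List.mem_singleton.mpr rfl), ?_⟩⟩
          unfold pvAdjC
          have heq : (x + d.1 - x, y + d.2 - y) = d := by
            obtain ⟨d1, d2⟩ := d; simp only [Prod.mk.injEq]; omega
          rw [heq]
          exact hd
        · intro p hp
          have := h2 p (List.mem_cons_of_mem _ hp)
          refine ⟨this.1, ?_⟩
          rcases this.2 with heq | ⟨q, hq, hadj⟩
          · exact Or.inl heq
          · exact Or.inr ⟨q, List.mem_append_left _ hq, hadj⟩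
      exact ih _ _ _ h1' h2'

theorem pvBfs_good (grid : List (List Int)) (h w color : Int) (r c : Int)
    (hr : 0 ≤ r) (hc : 0 ≤ c) (fuel : Nat) (seen : List (List Bool)) :
    pvGood (pvBfs grid h w color fuel [(r, c)] seen []).1 := by
  have hmain := pvBfs_invariant grid h w color (r, c) fuel [(r, c)] seen []
    (by intro p hp; simp at hp)
    (by
      intro p hp
      rw [List.mem_singleton.mp hp]
      exact ⟨⟨hr, hc⟩, Or.inl rfl⟩)
  constructor
  · intro p hp; exact (hmain p hp).1
  · intro a ha b hb
    exact (pvReach_symm (hmain a ha).2).trans (hmain b hb).2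

theorem pvComponents_good (grid : List (List Int)) (bg : Int) :
    ∀ cs ∈ pvComponents grid bg, pvGood cs := by
  unfold pvComponents
  generalize (PySem.List.len grid) = h
  generalize (PySem.List.len (PySem.List.pyGetD grid 0 [])) = w
  have inner : ∀ (cols : List Int) (r : Int), 0 ≤ r → (∀ c ∈ cols, 0 ≤ c) →
      ∀ (st : List (List (Int × Int)) × List (List Bool)), (∀ cs ∈ st.1, pvGood cs) →
      ∀ cs ∈ (cols.foldl (fun st c =>
        if pvSeenAt st.2 r c || (pvGridAt grid r c == bg) then st
        else
          (st.1 ++ [(pvBfs grid h w (pvGridAt grid r c) (h.toNat * w.toNat + 1) [(r, c)]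
              (pvSeenSet st.2 r c) []).1],
           (pvBfs grid h w (pvGridAt grid r c) (h.toNat * w.toNat + 1) [(r, c)]
              (pvSeenSet st.2 r c) []).2)) st).1, pvGood cs := by
    intro cols
    induction cols with
    | nil => intro r _ _ st hst; exact hst
    | cons col cols ihc =>
      intro r hr hcols st hst
      simp only [List.foldl_cons]
      apply ihc r hr (fun c' hc' => hcols c' (List.mem_cons_of_mem _ hc'))
      split
      · exact hst
      · intro cs hcs
        rcases List.mem_append.mp hcs with hcs | hcs
        · exact hst cs hcs
        · rw [List.mem_singleton.mp hcs]
          exact pvBfs_good grid h w _ r col hr (hcols col (List.mem_cons_self ..)) _ _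
  have main : ∀ (rows : List Int), (∀ r ∈ rows, 0 ≤ r) →
      ∀ (st : List (List (Int × Int)) × List (List Bool)), (∀ cs ∈ st.1, pvGood cs) →
      ∀ cs ∈ (rows.foldl (fun st r =>
        (PySem.List.pyRange 0 w 1).foldl (fun st c =>
          if pvSeenAt st.2 r c || (pvGridAt grid r c == bg) then st
          else
            (st.1 ++ [(pvBfs grid h w (pvGridAt grid r c) (h.toNat * w.toNat + 1) [(r, c)]
                (pvSeenSet st.2 r c) []).1],
             (pvBfs grid h w (pvGridAt grid r c) (h.toNat * w.toNat + 1) [(r, c)]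
                (pvSeenSet st.2 r c) []).2)) st) st).1, pvGood cs := by
    intro rows
    induction rows with
    | nil => intro _ st hst; exact hst
    | cons r rows ihr =>
      intro hrows st hst
      simp only [List.foldl_cons]
      apply ihr (fun r' hr' => hrows r' (List.mem_cons_of_mem _ hr'))
      exact inner _ r (hrows r (List.mem_cons_self ..))
        (fun c hcm => (PySem.List.mem_pyRange_one.mp hcm).1) st hst
  intro cs hcs
  exact main _ (fun r' hr' => (PySem.List.mem_pyRange_one.mp hr').1) _ (by simp) cs hcs

-- ---------- the background colour ----------

-- head of a stable descending sort = first maximum (Counter.most_common(1)[0] vs max())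
theorem pvSortedHead {α : Type} (key : α → Int) (l : List α) :
    (PySem.List.sorted l key true).head? = PySem.List.max? l key := by
  have aux : ∀ (xs : List α) (acc : List α),
      (xs.foldl (fun acc x =>
        PySem.List.insertBy (fun a b => decide (key b < key a)) x acc) acc).head?
      = xs.foldl (fun m x => match m with
          | none => some x
          | some m => if key m < key x then some x else some m) acc.head? := by
    intro xs
    induction xs with
    | nil => intro acc; rfl
    | cons x xs ih =>
      intro acc
      simp only [List.foldl_cons]
      rw [ih]
      congr 1
      cases acc with
      | nil => rfl
      | cons hd tl =>
        by_cases hk : key hd < key x <;>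
          simp [PySem.List.insertBy, hk]
  exact aux l []

theorem pvFoldl_rows {β γ : Type} (f : β → γ → β) :
    ∀ (rows : List (List γ)) (d : β),
      rows.foldl (fun d row => row.foldl f d) d = (rows.flatMap (fun r => r)).foldl f d := by
  intro rows
  induction rows with
  | nil => intro d; rfl
  | cons row rows ih => intro d; simp [List.foldl_append, ih]

theorem pvBackground_eq (grid : List (List Int)) :
    (PySem.List.pyGetD
        (PySem.List.sorted (PySem.Dict.counter (grid.flatMap (fun row => row))).items
          (fun kv => kv.2) true) 0 (0, (0 : Int))).1 =
      ((PySem.List.max?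
          (grid.foldl (fun d row => row.foldl (fun d v => d.insert v (d.getD v 0 + 1)) d)
            (PySem.Dict.empty : PySem.Dict Int Int)).items (fun kv => kv.2)).getD
        ((0 : Int), (0 : Int))).1 := by
  rw [pvFoldl_rows, PySem.Dict.foldl_insert_getD_add_one_eq_counter]
  have hget : ∀ (l : List (Int × Int)) (d : Int × Int),
      PySem.List.pyGetD l 0 d = (l.head?).getD d := by
    intro l d
    rw [PySem.List.pyGetD_zero]
    cases l <;> rfl
  rw [hget, pvSortedHead]

-- ---------- painting the result ----------

def pvUpd (res : List (List Int)) (kv : (Int × Int) × Int) : List (List Int) :=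
  PySem.List.pySetD res kv.1.1
    (PySem.List.pySetD (PySem.List.pyGetD res kv.1.1 []) kv.1.2 kv.2)

def pvRebuild (grid : List (List Int)) (d : PySem.Dict (Int × Int) Int) : List (List Int) :=
  (PySem.List.enumerate grid 0).map (fun rrow =>
    (PySem.List.enumerate rrow.2 0).map (fun cv => (d.get? (rrow.1, cv.1)).getD cv.2))

theorem pvRebuild_empty (grid : List (List Int)) : pvRebuild grid PySem.Dict.empty = grid := by
  unfold pvRebuild
  simp [PySem.Dict.get?_empty, PySem.List.map_snd_enumerate]

theorem pvUpd_rebuild (g : List (List Int)) (d : PySem.Dict (Int × Int) Int)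
    (k : Int × Int) (v : Int) (hk1 : 0 ≤ k.1) (hk2 : 0 ≤ k.2) :
    pvUpd (pvRebuild g d) (k, v) = pvRebuild g (d.insert k v) := by
  unfold pvUpd pvRebuild
  simp only []
  rw [PySem.List.pySetD_of_nonneg _ _ hk1]
  apply List.ext_getElem
  · simp [PySem.List.length_enumerate]
  intro i hi1 hi2
  have hig : i < g.length := by
    simpa [PySem.List.length_enumerate] using hi2
  have hmapel : ∀ (dd : PySem.Dict (Int × Int) Int),
      (List.map (fun rrow => (PySem.List.enumerate rrow.2 0).map
        (fun cv => (dd.get? (rrow.1, cv.1)).getD cv.2)) (PySem.List.enumerate g 0))[i]'(by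
          simp [PySem.List.length_enumerate]; omega) =
      (PySem.List.enumerate (g[i]'hig) 0).map
        (fun cv => (dd.get? (((i : Int), cv.1) : Int × Int)).getD cv.2) := by
    intro dd
    rw [List.getElem_map, PySem.List.getElem_enumerate]
    simp
  simp only [List.getElem_set]
  rw [hmapel]
  by_cases hik : k.1.toNat = i
  · rw [if_pos hik]
    -- the updated row
    have hkcast : ((i : Int)) = k.1 := by omega
    have hrowget : PySem.List.pyGetD
        (List.map (fun rrow => (PySem.List.enumerate rrow.2 0).map
          (fun cv => (d.get? (rrow.1, cv.1)).getD cv.2)) (PySem.List.enumerate g 0)) k.1 [] =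
        (PySem.List.enumerate (g[i]'hig) 0).map
          (fun cv => (d.get? (((i : Int), cv.1) : Int × Int)).getD cv.2) := by
      rw [← hkcast, PySem.List.pyGetD_natCast, List.getD_eq_getElem _ _ (by
        simp [PySem.List.length_enumerate]; omega)]
      exact hmapel d
    rw [hrowget, PySem.List.pySetD_of_nonneg _ _ hk2]
    apply List.ext_getElem
    · simp [PySem.List.length_enumerate, PySem.List.getElem_enumerate]
    intro j hj1 hj2
    simp only [List.getElem_set, List.getElem_map, PySem.List.getElem_enumerate, zero_add]
    rw [PySem.Dict.get?_insert]
    by_cases hjk : k.2.toNat = j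
    · rw [if_pos hjk]
      rw [if_pos (by obtain ⟨k1, k2⟩ := k; simp only [Prod.mk.injEq]; constructor <;> omega)]
      rfl
    · rw [if_neg hjk]
      rw [if_neg (by obtain ⟨k1, k2⟩ := k; simp only [Prod.mk.injEq, not_and]; intro _ h2; omega)]
  · rw [if_neg hik]
    rw [hmapel]
    apply List.map_congr_left
    intro cv _
    rw [PySem.Dict.get?_insert]
    rw [if_neg (by obtain ⟨k1, k2⟩ := k; simp only [Prod.mk.injEq, not_and]; intro h1; omega)]

theorem pvApply_rebuild (g : List (List Int)) :
    ∀ (us : List ((Int × Int) × Int)) (d : PySem.Dict (Int × Int) Int),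
      (∀ kv ∈ us, 0 ≤ kv.1.1 ∧ 0 ≤ kv.1.2) →
      us.foldl pvUpd (pvRebuild g d) =
        pvRebuild g (us.foldl (fun d kv => d.insert kv.1 kv.2) d) := by
  intro us
  induction us with
  | nil => intro d _; rfl
  | cons kv us ih =>
    intro d hpos
    simp only [List.foldl_cons]
    have hkv := hpos kv (List.mem_cons_self ..)
    rw [show pvUpd (pvRebuild g d) kv = pvRebuild g (d.insert kv.1 kv.2) from by
      obtain ⟨k, v⟩ := kv
      exact pvUpd_rebuild g d k v hkv.1 hkv.2]
    exact ih _ (fun kv' h' => hpos kv' (List.mem_cons_of_mem _ h'))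

theorem pvPaint_flatten (f : List (Int × Int) → Int) :
    ∀ (comps : List (List (Int × Int))) (init : List (List Int)),
      comps.foldl (fun result cells =>
        cells.foldl (fun result rc =>
          PySem.List.pySetD result rc.1
            (PySem.List.pySetD (PySem.List.pyGetD result rc.1 []) rc.2 (f cells))) result) init =
      (comps.flatMap (fun cells => cells.map (fun rc => (rc, f cells)))).foldl pvUpd init := by
  intro comps
  induction comps with
  | nil => intro init; rfl
  | cons cells comps ih =>
    intro init
    simp only [List.foldl_cons, List.flatMap_cons, List.foldl_append]
    rw [← ih]
    congr 1
    rw [List.foldl_map]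
    simp only [pvUpd]

theorem pvDict_flatten (f : List (Int × Int) → Int) :
    ∀ (comps : List (List (Int × Int))) (e : PySem.Dict (Int × Int) Int),
      comps.foldl (fun d cells => cells.foldl (fun d cell => d.insert cell (f cells)) d) e =
      (comps.flatMap (fun cells => cells.map (fun rc => (rc, f cells)))).foldl
        (fun d kv => d.insert kv.1 kv.2) e := by
  intro comps
  induction comps with
  | nil => intro e; rfl
  | cons cells comps ih =>
    intro e
    simp only [List.foldl_cons, List.flatMap_cons, List.foldl_append]
    rw [← ih]
    congr 1
    rw [List.foldl_map]

theorem pvPaint_eq (grid : List (List Int)) (comps : List (List (Int × Int)))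
    (hpos : ∀ cs ∈ comps, ∀ p ∈ cs, 0 ≤ p.1 ∧ 0 ≤ p.2)
    (f : List (Int × Int) → Int) :
    comps.foldl (fun result cells =>
        cells.foldl (fun result rc =>
          PySem.List.pySetD result rc.1
            (PySem.List.pySetD (PySem.List.pyGetD result rc.1 []) rc.2 (f cells))) result)
      (grid.map (fun row => row)) =
    (PySem.List.enumerate grid 0).map (fun rrow =>
      (PySem.List.enumerate rrow.2 0).map (fun cv =>
        (((comps.foldl (fun d cells =>
            cells.foldl (fun d cell => d.insert cell (f cells)) d)
          (PySem.Dict.empty : PySem.Dict (Int × Int) Int)).get? (rrow.1, cv.1)).getD cv.2))) := by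
  rw [pvPaint_flatten f comps, pvDict_flatten f comps]
  have hid : grid.map (fun row => row) = grid := List.map_id' _
  rw [hid]
  have hpos' : ∀ kv ∈ comps.flatMap (fun cells => cells.map (fun rc => (rc, f cells))),
      0 ≤ kv.1.1 ∧ 0 ≤ kv.1.2 := by
    intro kv hkv
    rw [List.mem_flatMap] at hkv
    obtain ⟨cells, hcells, hkv⟩ := hkv
    rw [List.mem_map] at hkv
    obtain ⟨rc, hrc, rfl⟩ := hkv
    exact hpos cells hcells rc hrc
  have := pvApply_rebuild grid
    (comps.flatMap (fun cells => cells.map (fun rc => (rc, f cells)))) PySem.Dict.empty hpos'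
  rw [pvRebuild_empty] at this
  rw [this]
  rfl

-- ===== VERDICT (by name: the statement is the Claim_ definition above) =====
theorem transform_spec : Claim_equal_transform := by
  intro grid _ _
  unfold Spec_transform
  show transform grid = transform_alt grid
  simp only [transform, transform_alt]
  rw [← pvBackground_eq grid]
  set bg := (PySem.List.pyGetD
      (PySem.List.sorted (PySem.Dict.counter (grid.flatMap (fun row => row))).items
        (fun kv => kv.2) true) 0 (0, (0 : Int))).1 with hbg
  rw [pvPaint_eq grid (pvComponents grid bg)
    (fun cs hcs => (pvComponents_good grid bg cs hcs).1) pvTypeA]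
  have hdict : (pvComponents grid bg).foldl (fun d cells =>
        cells.foldl (fun d cell => d.insert cell (pvTypeA cells)) d)
      (PySem.Dict.empty : PySem.Dict (Int × Int) Int) =
      (pvComponents grid bg).foldl (fun d cells =>
        cells.foldl (fun d cell => d.insert cell (pvTypeB cells)) d)
      (PySem.Dict.empty : PySem.Dict (Int × Int) Int) :=
    PySem.List.foldl_congr_mem _ _ _ _ (fun acc cells hmem => by
      rw [pvType_eq cells (pvComponents_good grid bg cells hmem)])
  rw [hdict]
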